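-- pv_equiv track=rewrite | github.com/RuoyuWen/LUA-Skills | LUA-content/lua_story_generator_backup/rag.py | extract_api_sections
-- ===== SOURCE A (Python) =====
-- from typing import List, Tuple
--
-- def chunk_by_sections(text: str) -> List[Tuple[str, str]]:
--     """Split document into sections (heading, content)."""
--     chunks = []
--     lines = text.split("\n")
--     current_heading = ""
--     current_content: List[str] = []
--
--     for line in lines:
--         if line.startswith("#") or line.startswith("##") or line.startswith("###"):
--             if current_content:
--                 chunks.append((current_heading, "\n".join(current_content)))
--             current_heading = line.strip()
--             current_content = [line]
--         else:
--             current_content.append(line)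
--
--     if current_content:
--         chunks.append((current_heading, "\n".join(current_content)))
--     return chunks
--
-- def extract_api_sections(lua_doc: str) -> List[str]:
--     """Extract API-related sections for coding context."""
--     chunks = chunk_by_sections(lua_doc)
--     relevant = []
--     for heading, content in chunks:
--         if any(
--             kw in heading.lower() or kw in content.lower()
--             for kw in ["api", "event", "world", "ui", "time", "entity", "performer", "math", "env"]
--         ):
--             relevant.append(f"{heading}\n{content}")
--     return relevant
-- ===== SOURCE B (Python) =====
-- KEYWORDS = ["api", "event", "world", "ui", "time", "entity", "performer", "math", "env"]
--
-- def _body_run(lines):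
--     """Maximal leading run of non-heading lines."""
--     body = []
--     for l in lines:
--         if l.startswith("#"):
--             break
--         body.append(l)
--     return body
--
-- def _sections(lines):
--     """Recursively split lines at heading boundaries into (heading, section_lines)."""
--     if not lines:
--         return []
--     head = lines[0]
--     body = _body_run(lines[1:])
--     rest = lines[1 + len(body):]
--     heading = head.strip() if head.startswith("#") else ""
--     return [(heading, [head] + body)] + _sections(rest)
--
-- def extract_api_sections(lua_doc: str):
--     out = []
--     for heading, section in _sections(lua_doc.split("\n")):
--         content = "\n".join(section)
--         if any(kw in heading.lower() or kw in content.lower() for kw in KEYWORDS):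
--             out.append(f"{heading}\n{content}")
--     return out
-- ===== Notes on version B (the rewrite author's own statement) =====
-- stated objective: alternative
-- what changed: B replaces A's line-by-line accumulator state machine (and its two-stage chunk-then-filter pipeline) by a recursive splitter that peels off one whole section at a time (first line plus the maximal run of non-heading lines) and filters each peeled section directly.
import Mathlib
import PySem

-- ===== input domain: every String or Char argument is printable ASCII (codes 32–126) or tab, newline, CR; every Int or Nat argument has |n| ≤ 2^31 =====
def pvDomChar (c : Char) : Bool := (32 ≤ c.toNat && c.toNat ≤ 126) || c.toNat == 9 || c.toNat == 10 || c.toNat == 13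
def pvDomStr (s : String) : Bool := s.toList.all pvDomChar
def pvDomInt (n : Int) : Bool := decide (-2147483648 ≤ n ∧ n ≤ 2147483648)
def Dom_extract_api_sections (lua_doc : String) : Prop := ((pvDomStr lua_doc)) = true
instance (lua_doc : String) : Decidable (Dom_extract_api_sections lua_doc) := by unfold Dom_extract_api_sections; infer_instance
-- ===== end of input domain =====

-- B replaces A's one-pass accumulator state machine by a recursive splitter that peels
-- off one whole section at a time (head line + maximal non-heading run) and filters; same output.

-- ===== PORT A =====
def pvKeywords : List String :=
  ["api", "event", "world", "ui", "time", "entity", "performer", "math", "env"]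

-- step of the 'for line in lines' loop of chunk_by_sections; state = (chunks, current_heading, current_content)
def pvChunkStep (st : List (String × String) × String × List String) (line : String) :
    List (String × String) × String × List String :=
  let (chunks, h, c) := st
  if PySem.Str.startswith line "#" || PySem.Str.startswith line "##" ||
      PySem.Str.startswith line "###" then
    let chunks := if c ≠ [] then chunks ++ [(h, PySem.Str.join "\n" c)] else chunks
    (chunks, PySem.Str.strip line, [line])
  else
    (chunks, h, c ++ [line])

def chunk_by_sections (text : String) : List (String × String) :=
  let lines := (PySem.Str.split? text "\n").getD []  -- sep "\n" ≠ "", so split? is always some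
  let st := lines.foldl pvChunkStep ([], "", [])
  let (chunks, h, c) := st
  if c ≠ [] then chunks ++ [(h, PySem.Str.join "\n" c)] else chunks

def extract_api_sections (lua_doc : String) : List String :=
  let chunks := chunk_by_sections lua_doc
  chunks.foldl
    (fun relevant hc =>
      let (heading, content) := hc
      if pvKeywords.any (fun kw =>
          PySem.Str.isIn kw (PySem.Str.lower heading) ||
          PySem.Str.isIn kw (PySem.Str.lower content)) then
        relevant ++ [heading ++ "\n" ++ content]
      else relevant)
    []

-- ===== PORT B =====
-- _body_run: maximal leading run of non-heading lines (the while/for-break loop = takeWhile)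
def pvBodyRun (lines : List String) : List String :=
  lines.takeWhile (fun l => !(PySem.Str.startswith l "#"))

-- _sections: recursively peel off one section (head line + its body run); rest = lines[1+len(body):]
def pvSections : List String → List (String × List String)
  | [] => []
  | head :: tl =>
    let body := pvBodyRun tl
    let rest := tl.drop body.length
    let heading := if PySem.Str.startswith head "#" then PySem.Str.strip head else ""
    (heading, head :: body) :: pvSections rest
termination_by l => l.length
decreasing_by
  simp only [List.length_cons]
  simp only [List.length_drop]
  omega

def extract_api_sections_alt (lua_doc : String) : List String :=
  (pvSections ((PySem.Str.split? lua_doc "\n").getD [])).foldl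
    (fun out hs =>
      let (heading, section_) := hs
      let content := PySem.Str.join "\n" section_
      if pvKeywords.any (fun kw =>
          PySem.Str.isIn kw (PySem.Str.lower heading) ||
          PySem.Str.isIn kw (PySem.Str.lower content)) then
        out ++ [heading ++ "\n" ++ content]
      else out)
    []

-- ===== PRECONDITION & SPEC =====
def Spec_extract_api_sections (lua_doc : String) (out : List String) : Prop := out = extract_api_sections_alt lua_doc
instance (lua_doc : String) (out : List String) : Decidable (Spec_extract_api_sections lua_doc out) := by unfold Spec_extract_api_sections; infer_instance

-- ===== CLAIM (what is proved, stated in full; the proofs are below) =====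
def Claim_equal_extract_api_sections : Prop := ∀ (lua_doc : String), Dom_extract_api_sections lua_doc → Spec_extract_api_sections lua_doc (extract_api_sections lua_doc)

-- ===== LEMMAS AND PROOFS =====

-- abbreviation for the heading predicate
def pvIsH (l : String) : Bool := PySem.Str.startswith l "#"

-- A's finalization of the loop state
def pvFin (st : List (String × String) × String × List String) : List (String × String) :=
  let (chunks, h, c) := st
  if c ≠ [] then chunks ++ [(h, PySem.Str.join "\n" c)] else chunks

-- joined view of B's sections
def pvJoined (lines : List String) : List (String × String) :=
  (pvSections lines).map (fun hs => (hs.1, PySem.Str.join "\n" hs.2))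

-- a line starting with "#" also decides the redundant "##"/"###" tests of A
theorem pvIsH_cond (line : String) :
    (PySem.Str.startswith line "#" || PySem.Str.startswith line "##" ||
      PySem.Str.startswith line "###") = pvIsH line := by
  cases hs : pvIsH line with
  | true => simp [pvIsH] at hs; simp [hs]
  | false =>
    have h2 : PySem.Str.startswith line "##" = false := by
      cases hss : PySem.Str.startswith line "##" with
      | false => rfl
      | true =>
        exfalso
        simp only [pvIsH] at hs
        rw [PySem.Str.startswith_eq] at hss hs
        have := (PySem.Chars.startswith_iff _ _).mp hss
        rw [(PySem.Chars.startswith_iff _ _).mpr (List.IsPrefix.trans (by decide) this)] at hs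
        exact Bool.true_eq_false.mp hs
    have h3 : PySem.Str.startswith line "###" = false := by
      cases hss : PySem.Str.startswith line "###" with
      | false => rfl
      | true =>
        exfalso
        simp only [pvIsH] at hs
        rw [PySem.Str.startswith_eq] at hss hs
        have := (PySem.Chars.startswith_iff _ _).mp hss
        rw [(PySem.Chars.startswith_iff _ _).mpr (List.IsPrefix.trans (by decide) this)] at hs
        exact Bool.true_eq_false.mp hs
    simp only [pvIsH] at hs
    simp [PySem.Str.startswith_eq] at hs h2 h3
    simp [hs, h2, h3]

-- unfolding pvSections on a cons
theorem pvSections_cons (head : String) (tl : List String) :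
    pvSections (head :: tl) =
      ((if pvIsH head then PySem.Str.strip head else ""),
        head :: tl.takeWhile (fun l => !pvIsH l)) ::
        pvSections (tl.drop (tl.takeWhile (fun l => !pvIsH l)).length) := by
  rw [pvSections]; rfl

theorem drop_takeWhile_eq_dropWhile {α : Type} (p : α → Bool) (l : List α) :
    l.drop (l.takeWhile p).length = l.dropWhile p := by
  induction l with
  | nil => rfl
  | cons a tl ih =>
    by_cases h : p a
    · simp [h, ih]
    · simp [h]

theorem pvJoined_cons (head : String) (tl : List String) :
    pvJoined (head :: tl) =
      ((if pvIsH head then PySem.Str.strip head else ""),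
        PySem.Str.join "\n" (head :: tl.takeWhile (fun l => !pvIsH l))) ::
        pvJoined (tl.dropWhile (fun l => !pvIsH l)) := by
  unfold pvJoined
  rw [pvSections_cons, drop_takeWhile_eq_dropWhile, List.map_cons]

-- main invariant: finalizing A's loop from a pending nonempty content equals the pending
-- section (absorbing the leading non-heading run) followed by B's sections of the rest
theorem pvMain (lines : List String) (chunks : List (String × String))
    (h : String) (c : List String) (hc : c ≠ []) :
    pvFin (lines.foldl pvChunkStep (chunks, h, c)) =
      chunks ++ [(h, PySem.Str.join "\n" (c ++ lines.takeWhile (fun l => !pvIsH l)))] ++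
        pvJoined (lines.dropWhile (fun l => !pvIsH l)) := by
  induction lines generalizing chunks h c with
  | nil => simp [pvFin, hc, pvJoined, pvSections]
  | cons line rest ih =>
    simp only [List.foldl_cons, pvChunkStep, pvIsH_cond]
    cases hl : pvIsH line with
    | false =>
      simp only [Bool.false_eq_true, if_false]
      rw [ih _ _ _ (by simp)]
      simp [hl]
    | true =>
      simp only [hc, ne_eq, not_false_eq_true, if_pos]
      rw [ih _ _ _ (by simp)]
      simp only [List.takeWhile_cons, List.dropWhile_cons, hl, Bool.not_true,
        Bool.false_eq_true, if_false]
      rw [pvJoined_cons]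
      simp [hl]

-- A's chunk list = joined view of B's sections
theorem chunks_eq_joined (text : String) :
    chunk_by_sections text = pvJoined ((PySem.Str.split? text "\n").getD []) := by
  unfold chunk_by_sections
  cases hl : (PySem.Str.split? text "\n").getD [] with
  | nil => simp [pvJoined, pvSections]
  | cons line rest =>
    show pvFin ((line :: rest).foldl pvChunkStep ([], "", [])) = _
    simp only [List.foldl_cons, pvChunkStep, pvIsH_cond]
    cases hh : pvIsH line with
    | false =>
      simp only [Bool.false_eq_true, if_false, List.nil_append]
      rw [pvMain _ _ _ _ (by simp), pvJoined_cons]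
      simp [hh]
    | true =>
      simp only [ne_eq, not_true_eq_false, if_false, if_true]
      rw [pvMain _ _ _ _ (by simp), pvJoined_cons]
      simp [hh]

-- filtering the joined view = B's fold over the sections themselves
theorem filt_joined (secs : List (String × List String)) (acc : List String) :
    (secs.map (fun hs => (hs.1, PySem.Str.join "\n" hs.2))).foldl
      (fun relevant hc =>
        let (heading, content) := hc
        if pvKeywords.any (fun kw =>
            PySem.Str.isIn kw (PySem.Str.lower heading) ||
            PySem.Str.isIn kw (PySem.Str.lower content)) then
          relevant ++ [heading ++ "\n" ++ content]
        else relevant) acc =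
    secs.foldl
      (fun out hs =>
        let (heading, section_) := hs
        let content := PySem.Str.join "\n" section_
        if pvKeywords.any (fun kw =>
            PySem.Str.isIn kw (PySem.Str.lower heading) ||
            PySem.Str.isIn kw (PySem.Str.lower content)) then
          out ++ [heading ++ "\n" ++ content]
        else out) acc := by
  induction secs generalizing acc with
  | nil => rfl
  | cons s tl ih => simp only [List.map_cons, List.foldl_cons]; exact ih _

-- ===== VERDICT (by name: the statement is the Claim_ definition above) =====
theorem extract_api_sections_spec : Claim_equal_extract_api_sections := by
  intro lua_doc _
  show extract_api_sections lua_doc = extract_api_sections_alt lua_doc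
  unfold extract_api_sections extract_api_sections_alt
  rw [chunks_eq_joined, pvJoined, filt_joined]
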